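-- pv_equiv track=rewrite | github.com/mikedasquirrel/narratio | narrative_optimization/src/analysis/story_quality.py | _group_features_by_transformer
-- ===== SOURCE A (Python) =====
-- from typing import List, Dict, Optional, Union
--
-- def _group_features_by_transformer(
--
--     feature_names: List[str]
-- ) -> Dict[str, List[int]]:
--     """
--     Group feature indices by transformer name.
--
--     Parameters
--     ----------
--     feature_names : list of str
--         Feature names like 'nominative_field_density', 'emotional_joy', etc.
--
--     Returns
--     -------
--     groups : dict
--         {transformer_name: [feature_indices]}
--     """
--     groups = {}
--
--     # Map prefixes to transformer names
--     prefix_map = {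
--         'nominative': 'nominative',
--         'self_perception': 'self_perception',
--         'narrative_potential': 'narrative_potential',
--         'linguistic': 'linguistic',
--         'ensemble': 'ensemble',
--         'relational': 'relational',
--         'statistical': 'statistical',
--         'emotional': 'emotional_semantic',
--         'authenticity': 'authenticity',
--         'conflict': 'conflict',
--         'suspense': 'suspense',
--         'expertise': 'expertise',
--         'cultural': 'cultural_context',
--         'phonetic': 'phonetic',
--         'social_status': 'social_status',
--         'temporal': 'temporal_evolution',
--         'quantitative': 'quantitative',
--         'visual': 'visual'
--     }
--
--     for idx, feat_name in enumerate(feature_names):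
--         # Extract transformer prefix
--         feat_lower = feat_name.lower()
--
--         assigned = False
--         for prefix, trans_name in prefix_map.items():
--             if feat_lower.startswith(prefix):
--                 if trans_name not in groups:
--                     groups[trans_name] = []
--                 groups[trans_name].append(idx)
--                 assigned = True
--                 break
--
--         if not assigned:
--             # Unknown transformer - assign to 'other'
--             if 'other' not in groups:
--                 groups['other'] = []
--             groups['other'].append(idx)
--
--     return groups
-- ===== SOURCE B (Python) =====
-- def _group_features_by_transformer(feature_names):
--     prefix_map = {
--         'nominative': 'nominative',
--         'self_perception': 'self_perception',
--         'narrative_potential': 'narrative_potential',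
--         'linguistic': 'linguistic',
--         'ensemble': 'ensemble',
--         'relational': 'relational',
--         'statistical': 'statistical',
--         'emotional': 'emotional_semantic',
--         'authenticity': 'authenticity',
--         'conflict': 'conflict',
--         'suspense': 'suspense',
--         'expertise': 'expertise',
--         'cultural': 'cultural_context',
--         'phonetic': 'phonetic',
--         'social_status': 'social_status',
--         'temporal': 'temporal_evolution',
--         'quantitative': 'quantitative',
--         'visual': 'visual'
--     }
--
--     def classify(name):
--         low = name.lower()
--         for prefix, trans_name in prefix_map.items():
--             if low.startswith(prefix):
--                 return trans_name
--         return 'other'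
--
--     labels = [classify(name) for name in feature_names]
--     keys = list(dict.fromkeys(labels))
--     return {k: [i for i, l in enumerate(labels) if l == k] for k in keys}
-- ===== Notes on version B (the rewrite author's own statement) =====
-- stated objective: alternative
-- what changed: A builds the dict in one pass, appending each index to its group as it walks the feature list; B first maps every feature to its transformer label, dedups the labels in first-occurrence order, and then builds each group by a per-key scan of the labelled list (inverted nesting: outer loop over keys, inner scan over indices).
import Mathlib
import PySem

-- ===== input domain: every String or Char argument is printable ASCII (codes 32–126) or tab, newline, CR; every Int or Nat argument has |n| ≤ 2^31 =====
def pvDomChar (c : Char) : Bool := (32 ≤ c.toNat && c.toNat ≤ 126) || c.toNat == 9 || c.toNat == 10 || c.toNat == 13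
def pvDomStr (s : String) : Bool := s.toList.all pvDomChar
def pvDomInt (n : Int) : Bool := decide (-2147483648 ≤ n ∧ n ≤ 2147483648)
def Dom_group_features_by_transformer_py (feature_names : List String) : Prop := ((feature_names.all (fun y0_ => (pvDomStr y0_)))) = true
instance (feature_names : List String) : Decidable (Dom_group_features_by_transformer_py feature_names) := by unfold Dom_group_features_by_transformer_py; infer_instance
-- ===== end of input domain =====

-- B: instead of A's single pass that appends each index into a growing dict, B labels every
-- feature first, dedups the labels in first-occurrence order, and fills each group by a
-- per-key scan (alternative decomposition, same result).

-- the prefix → transformer-name table, shared by both programs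
def pvPrefixMap : List (String × String) :=
  [("nominative", "nominative"), ("self_perception", "self_perception"),
   ("narrative_potential", "narrative_potential"), ("linguistic", "linguistic"),
   ("ensemble", "ensemble"), ("relational", "relational"), ("statistical", "statistical"),
   ("emotional", "emotional_semantic"), ("authenticity", "authenticity"),
   ("conflict", "conflict"), ("suspense", "suspense"), ("expertise", "expertise"),
   ("cultural", "cultural_context"), ("phonetic", "phonetic"),
   ("social_status", "social_status"), ("temporal", "temporal_evolution"),
   ("quantitative", "quantitative"), ("visual", "visual")]

-- ===== PORT A =====
-- A's inner 'for prefix, trans_name in prefix_map.items(): if …: …; break' loop: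
-- first matching prefix's transformer name (none = no match, the 'assigned = False' case)
def pvFindMatch : String → List (String × String) → Option String
  | _, [] => none
  | low, (p, t) :: rest =>
      if PySem.Str.startswith low p then some t else pvFindMatch low rest

-- "if trans_name not in groups: groups[trans_name] = []" (= setdefault) then ".append(idx)"
def pvAppendIdx (groups : PySem.Dict String (List Int)) (k : String) (i : Int) :
    PySem.Dict String (List Int) :=
  (groups.setdefault k []).modify k [] (fun l => l ++ [i])

def group_features_by_transformer_py (feature_names : List String) : List (String × List Int) :=
  ((PySem.List.enumerate feature_names 0).foldl
    (fun groups p =>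
      let feat_lower := PySem.Str.lower p.2
      match pvFindMatch feat_lower pvPrefixMap with
      | some trans_name => pvAppendIdx groups trans_name p.1
      | none => pvAppendIdx groups "other" p.1)
    PySem.Dict.empty).items

-- ===== PORT B =====
-- Source B's classify: scan prefix_map, return the transformer name of the first match, else 'other'
def pvClassifyGo : String → List (String × String) → String
  | _, [] => "other"
  | low, (p, t) :: rest =>
      if PySem.Str.startswith low p then t else pvClassifyGo low rest

def pvClassify (name : String) : String :=
  pvClassifyGo (PySem.Str.lower name) pvPrefixMap

def group_features_by_transformer_py_alt (feature_names : List String) : List (String × List Int) :=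
  let labels := feature_names.map pvClassify
  let keys := PySem.Set.ofList labels      -- list(dict.fromkeys(labels))
  keys.map (fun k =>
    (k, (PySem.List.enumerate labels 0).filterMap
          (fun p => if p.2 == k then some p.1 else none)))

-- ===== PRECONDITION & SPEC =====
def Spec_group_features_by_transformer_py (feature_names : List String) (out : List (String × List Int)) : Prop := out = group_features_by_transformer_py_alt feature_names
instance (feature_names : List String) (out : List (String × List Int)) : Decidable (Spec_group_features_by_transformer_py feature_names out) := by unfold Spec_group_features_by_transformer_py; infer_instance

-- ===== CLAIM (what is proved, stated in full; the proofs are below) =====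
def Claim_equal_group_features_by_transformer_py : Prop := ∀ (feature_names : List String), Dom_group_features_by_transformer_py feature_names → Spec_group_features_by_transformer_py feature_names (group_features_by_transformer_py feature_names)

-- ===== LEMMAS AND PROOFS =====

-- Source B's classify is A's inner loop with 'other' as the unmatched default
theorem pvClassifyGo_eq (low : String) (l : List (String × String)) :
    pvClassifyGo low l = (pvFindMatch low l).getD "other" := by
  induction l with
  | nil => rfl
  | cons hd tl ih =>
      obtain ⟨p, t⟩ := hd
      simp only [pvClassifyGo, pvFindMatch]
      split <;> simp [ih]

-- A's setdefault-then-append equals a single modify-with-default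
theorem pvAppendIdx_eq_modify (g : PySem.Dict String (List Int)) (k : String) (i : Int) :
    pvAppendIdx g k i = g.modify k [] (fun l => l ++ [i]) := by
  unfold pvAppendIdx PySem.Dict.modify
  by_cases h : g.contains k = true
  · rw [PySem.Dict.setdefault_of_contains _ _ h]
  · have h' : g.contains k = false := by simpa using h
    rw [PySem.Dict.setdefault_of_not_contains _ _ h',
        PySem.Dict.getD_of_not_contains _ _ h',
        PySem.Dict.getD_insert_self, PySem.Dict.insert_insert_self]

-- A's fold body, rewritten through the two lemmas above
theorem pvBody_eq (g : PySem.Dict String (List Int)) (p : Int × String) :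
    (let feat_lower := PySem.Str.lower p.2
     match pvFindMatch feat_lower pvPrefixMap with
     | some trans_name => pvAppendIdx g trans_name p.1
     | none => pvAppendIdx g "other" p.1) =
    g.modify (pvClassify p.2) [] (fun l => l ++ [p.1]) := by
  rw [← pvAppendIdx_eq_modify]
  unfold pvClassify
  rw [pvClassifyGo_eq]
  cases h : pvFindMatch (PySem.Str.lower p.2) pvPrefixMap <;> simp [h]

-- A's dict-building loop, as a named function (proof-side only)
def pvFold (fn : List String) : PySem.Dict String (List Int) :=
  (PySem.List.enumerate fn 0).foldl
    (fun d p => d.modify (pvClassify p.2) [] (fun l => l ++ [p.1]))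
    PySem.Dict.empty

theorem pvA_eq_fold (fn : List String) :
    group_features_by_transformer_py fn = (pvFold fn).items := by
  unfold group_features_by_transformer_py pvFold
  rw [PySem.List.foldl_congr_mem _ _ _ _ (fun g p _ => pvBody_eq g p)]

theorem pvKeys_gen (l : List (Int × String)) (d : PySem.Dict String (List Int)) :
    (l.foldl (fun d p => d.modify (pvClassify p.2) [] (fun v => v ++ [p.1])) d).keys
      = PySem.Set.update d.keys (l.map (fun p => pvClassify p.2)) := by
  induction l generalizing d with
  | nil => simp [PySem.Set.update_nil]
  | cons hd tl ih =>
      simp only [List.foldl_cons, List.map_cons, PySem.Set.update_cons, ih]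
      have hk : (d.modify (pvClassify hd.2) [] (fun v => v ++ [hd.1])).keys
          = PySem.Set.add d.keys (pvClassify hd.2) := by
        rw [PySem.Dict.keys_modify]
        by_cases hc : d.contains (pvClassify hd.2) = true
        · rw [PySem.Dict.keys_insert_of_contains _ _ hc,
            PySem.Set.add_of_mem ((PySem.Dict.contains_iff_mem_keys d _).mp hc)]
        · have hc' : d.contains (pvClassify hd.2) = false := by simpa using hc
          rw [PySem.Dict.keys_insert_of_not_contains _ _ hc',
            PySem.Set.add_of_not_mem
              (fun hm => by simp [(PySem.Dict.contains_iff_mem_keys d _).mpr hm] at hc')]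
      rw [hk]

theorem pvKeys (fn : List String) :
    (pvFold fn).keys = PySem.Set.ofList (fn.map pvClassify) := by
  unfold pvFold
  rw [pvKeys_gen]
  have h2 : (PySem.List.enumerate fn 0).map (fun p => pvClassify p.2) = fn.map pvClassify := by
    rw [show (fun p : Int × String => pvClassify p.2) =
          pvClassify ∘ (fun p : Int × String => p.2) from rfl,
      ← List.map_map, PySem.List.map_snd_enumerate]
  rw [show PySem.Dict.empty.keys = ([] : List String) from rfl, h2,
    PySem.Set.update_nil_left]

theorem pvNodup (fn : List String) : (pvFold fn).keys.Nodup := by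
  rw [pvKeys]
  exact PySem.Set.nodup_ofList _

theorem pvGetD_gen (l : List (Int × String)) (d : PySem.Dict String (List Int)) (k : String) :
    (l.foldl (fun d p => d.modify (pvClassify p.2) [] (fun v => v ++ [p.1])) d).getD k []
      = d.getD k [] ++ (l.filter (fun p => pvClassify p.2 == k)).map (fun p => p.1) := by
  induction l generalizing d with
  | nil => simp
  | cons hd tl ih =>
      simp only [List.foldl_cons, ih, List.filter_cons]
      by_cases h : pvClassify hd.2 = k
      · simp [h]
      · have hb : (pvClassify hd.2 == k) = false := by simpa using h
        have h' : ¬(k = pvClassify hd.2) := fun e => h e.symm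
        simp [PySem.Dict.getD_modify, h', hb]

-- the indices of the features labelled k, computed A's way and B's way, agree
theorem pvIdx_eq (k : String) (fn : List String) (s : Int) :
    ((PySem.List.enumerate fn s).filter (fun p => pvClassify p.2 == k)).map (fun p => p.1)
      = (PySem.List.enumerate (fn.map pvClassify) s).filterMap
          (fun p => if p.2 == k then some p.1 else none) := by
  induction fn generalizing s with
  | nil => rfl
  | cons hd tl ih =>
      simp only [List.map_cons, PySem.List.enumerate_cons, List.filter_cons, List.filterMap]
      by_cases h : pvClassify hd = k
      · simp [h, ih]
      · have hb : (pvClassify hd == k) = false := by simpa using h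
        simp [hb, ih]

theorem pvGetD (fn : List String) (k : String) :
    (pvFold fn).getD k [] =
      (PySem.List.enumerate (fn.map pvClassify) 0).filterMap
        (fun p => if p.2 == k then some p.1 else none) := by
  unfold pvFold
  rw [pvGetD_gen, PySem.Dict.getD_empty, List.nil_append]
  exact pvIdx_eq k fn 0

theorem pvMain (fn : List String) :
    group_features_by_transformer_py fn = group_features_by_transformer_py_alt fn := by
  rw [pvA_eq_fold, PySem.Dict.items_eq_map_keys _ (pvNodup fn) [], pvKeys]
  unfold group_features_by_transformer_py_alt
  exact List.map_congr_left (fun k _ => by rw [pvGetD fn k])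

-- ===== VERDICT (by name: the statement is the Claim_ definition above) =====
theorem group_features_by_transformer_py_spec : Claim_equal_group_features_by_transformer_py := by
  intro fn _
  unfold Spec_group_features_by_transformer_py
  exact pvMain fn
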